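-- pv_equiv track=rewrite | github.com/JamesAC42/Rodnam | school/kj7b/kj7bmod.py | refined
-- ===== SOURCE A (Python) =====
-- def refined(charvalues,oldinput):
-- 	refined = ""
-- 	errors = []
-- 	for i in range(len(oldinput)):
-- 		if oldinput[i] not in charvalues:
-- 			if oldinput[i] == '\n':
-- 				refined += " "
-- 				continue
-- 			refined += ""
-- 			errors += oldinput[i]
-- 		else:
-- 			refined += oldinput[i]
-- 	return refined, errors
-- ===== SOURCE B (Python) =====
-- def refined(charvalues, oldinput):
--     allowed = set(charvalues)
--     sep = "\n" if "\n" in allowed else " "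
--     parts = []
--     errors = []
--     for line in oldinput.split("\n"):
--         kept = []
--         for c in line:
--             (kept if c in allowed else errors).append(c)
--         parts.append("".join(kept))
--     return sep.join(parts), errors
-- ===== Notes on version B (the rewrite author's own statement) =====
-- stated objective: faster
-- what changed: Replaces A's single char-by-char loop mutating two accumulators by a line-oriented pipeline: precompute an allowed set and the line separator ('\n' if allowed, else a space), split the input on newlines, sort each line's chars into kept/errors lists, and join the refined lines with the separator; O(1) set membership and list-append+join replace A's O(m) list scan and quadratic-prone string +=.
import Mathlib
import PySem

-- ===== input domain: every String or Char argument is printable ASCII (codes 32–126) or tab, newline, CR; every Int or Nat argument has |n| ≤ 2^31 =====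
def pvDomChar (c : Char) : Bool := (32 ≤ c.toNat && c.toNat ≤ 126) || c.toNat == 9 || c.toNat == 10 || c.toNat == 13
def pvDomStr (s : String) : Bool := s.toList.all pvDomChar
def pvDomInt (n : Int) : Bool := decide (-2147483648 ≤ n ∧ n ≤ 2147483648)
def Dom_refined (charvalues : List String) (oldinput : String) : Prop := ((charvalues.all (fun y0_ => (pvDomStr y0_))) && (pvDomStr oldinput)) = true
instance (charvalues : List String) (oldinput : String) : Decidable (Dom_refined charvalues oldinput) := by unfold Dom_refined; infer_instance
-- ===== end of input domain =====

-- B restructures A's single char-by-char loop as line-at-a-time processing: split the input on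
-- newlines, sort each line's characters into kept/errors, and re-join the lines with the separator
-- newlines map to ('\n' itself if allowed, else a space); objective: faster (set membership and list+join, measured).

-- ===== PORT A =====
-- transliteration of A: one loop over the characters in order, mutating (refined, errors)
def refined (charvalues : List String) (oldinput : String) : String × List String :=
  oldinput.toList.foldl
    (fun (st : String × List String) c =>
      if ¬ (String.ofList [c] ∈ charvalues) then
        if c = '\n' then (st.1 ++ " ", st.2)
        else (st.1 ++ "", st.2 ++ [String.ofList [c]])
      else (st.1 ++ String.ofList [c], st.2))
    ("", [])

-- ===== PORT B =====
-- transliteration of B: allowed-set, pick the separator, split on '\n'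
-- (Python str.split("\n") ported as core List.splitOn '\n' on the character list),
-- one inner loop per line sorting chars into kept/errors, then join with the separator
def refined_alt (charvalues : List String) (oldinput : String) : String × List String :=
  let allowed : PySem.Set String := PySem.Set.ofList charvalues
  let sep : List Char := if ("\n" : String) ∈ allowed then ['\n'] else [' ']
  let st := (oldinput.toList.splitOn '\n').foldl
    (fun (st : List (List Char) × List String) line =>
      let ke := line.foldl
        (fun (ke : List Char × List String) c =>
          if String.ofList [c] ∈ allowed then (ke.1 ++ [c], ke.2)
          else (ke.1, ke.2 ++ [String.ofList [c]]))
        ([], st.2)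
      (st.1 ++ [ke.1], ke.2))
    ([], [])
  (String.ofList (PySem.Chars.join sep st.1), st.2)

-- ===== PRECONDITION & SPEC =====
def Spec_refined (charvalues : List String) (oldinput : String) (out : String × List String) : Prop := out = refined_alt charvalues oldinput
instance (charvalues : List String) (oldinput : String) (out : String × List String) : Decidable (Spec_refined charvalues oldinput out) := by unfold Spec_refined; infer_instance

-- ===== CLAIM (what is proved, stated in full; the proofs are below) =====
def Claim_equal_refined : Prop := ∀ (charvalues : List String) (oldinput : String), Dom_refined charvalues oldinput → Spec_refined charvalues oldinput (refined charvalues oldinput)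

-- ===== LEMMAS AND PROOFS =====

-- prepending a char to the first line distributes over join
lemma pv_join_cons_head (sep : List Char) (c : Char) (h : List Char) (rest : List (List Char)) :
    PySem.Chars.join sep ((c :: h) :: rest) = c :: PySem.Chars.join sep (h :: rest) := by
  cases rest with
  | nil => simp [PySem.Chars.join_singleton]
  | cons y ys => simp [PySem.Chars.join_cons_cons]

-- B's inner per-line loop (membership already rewritten to the underlying list)
lemma pv_inner (charvalues : List String) (line : List Char) :
    ∀ (k : List Char) (e : List String),
      line.foldl
        (fun (ke : List Char × List String) c =>
          if String.ofList [c] ∈ charvalues then (ke.1 ++ [c], ke.2)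
          else (ke.1, ke.2 ++ [String.ofList [c]]))
        (k, e)
      = (k ++ line.filter (fun c => decide (String.ofList [c] ∈ charvalues)),
         e ++ (line.filter (fun c => !decide (String.ofList [c] ∈ charvalues))).map
                (fun c => String.ofList [c])) := by
  induction line with
  | nil => intro k e; simp
  | cons c t ih =>
    intro k e
    by_cases hm : String.ofList [c] ∈ charvalues <;>
      simp [List.foldl_cons, hm, ih]

-- B's outer loop over the lines
lemma pv_outer (charvalues : List String) (lines : List (List Char)) :
    ∀ (p : List (List Char)) (e : List String),
      lines.foldl
        (fun (st : List (List Char) × List String) line =>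
          (st.1 ++ [(line.foldl
            (fun (ke : List Char × List String) c =>
              if String.ofList [c] ∈ charvalues then (ke.1 ++ [c], ke.2)
              else (ke.1, ke.2 ++ [String.ofList [c]]))
            ([], st.2)).1],
           (line.foldl
            (fun (ke : List Char × List String) c =>
              if String.ofList [c] ∈ charvalues then (ke.1 ++ [c], ke.2)
              else (ke.1, ke.2 ++ [String.ofList [c]]))
            ([], st.2)).2))
        (p, e)
      = (p ++ lines.map (fun line => line.filter (fun c => decide (String.ofList [c] ∈ charvalues))),
         e ++ (lines.flatMap (fun line => line.filter (fun c => !decide (String.ofList [c] ∈ charvalues)))).map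
                (fun c => String.ofList [c])) := by
  induction lines with
  | nil => intro p e; simp
  | cons line rest ih =>
    intro p e
    rw [List.foldl_cons, pv_inner, ih]
    simp

-- A's loop, characterised against the split of the remaining input
lemma pv_main (charvalues : List String) (l : List Char) :
    ∀ (acc : String × List String),
      l.foldl
        (fun (st : String × List String) c =>
          if ¬ (String.ofList [c] ∈ charvalues) then
            if c = '\n' then (st.1 ++ " ", st.2)
            else (st.1 ++ "", st.2 ++ [String.ofList [c]])
          else (st.1 ++ String.ofList [c], st.2)) acc
      = (acc.1 ++ String.ofList (PySem.Chars.join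
            (if ("\n" : String) ∈ charvalues then ['\n'] else [' '])
            ((l.splitOn '\n').map
              (fun line => line.filter (fun c => decide (String.ofList [c] ∈ charvalues))))),
         acc.2 ++ ((l.splitOn '\n').flatMap
              (fun line => line.filter (fun c => !decide (String.ofList [c] ∈ charvalues)))).map
                (fun c => String.ofList [c])) := by
  induction l with
  | nil =>
    intro acc
    simp [List.splitOn, List.splitOnP, List.splitOnP.go, PySem.Chars.join_singleton]
  | cons c t ih =>
    intro acc
    have hsplit : (c :: t).splitOn '\n' = if c == '\n' then [] :: t.splitOn '\n'
        else List.modifyHead (List.cons c) (t.splitOn '\n') := List.splitOnP_cons _ c t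
    obtain ⟨h, rest, hS⟩ : ∃ h rest, t.splitOn '\n' = h :: rest := by
      rcases List.exists_cons_of_ne_nil (List.splitOnP_ne_nil _ t) with ⟨h, rest, hx⟩
      exact ⟨h, rest, hx⟩
    have hnl : ("\n" : String) = String.ofList ['\n'] := rfl
    have hsp : (" " : String) = String.ofList [' '] := rfl
    by_cases hn : c = '\n'
    · subst hn
      simp only [List.foldl_cons, hsplit, beq_self_eq_true, if_true, hS]
      by_cases hm : ("\n" : String) ∈ charvalues
      · rw [if_neg (by rw [← hnl]; exact not_not_intro hm), ih]
        simp only [hm, if_true, List.map_cons, List.flatMap_cons, List.filter_nil,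
          List.nil_append, Prod.mk.injEq]
        constructor
        · rw [PySem.Chars.join_cons_cons, ← hnl, String.append_assoc, hnl,
            ← String.ofList_append]
          simp [hS]
        · simp [hS]
      · rw [if_pos (by rw [← hnl]; exact hm), ih]
        simp only [hm, if_false, List.map_cons, List.flatMap_cons, List.filter_nil,
          List.nil_append, Prod.mk.injEq]
        constructor
        · rw [PySem.Chars.join_cons_cons, hsp, String.append_assoc,
            ← String.ofList_append]
          simp [hS]
        · simp [hS]
    · have hb : (c == '\n') = false := by simp [hn]
      simp only [List.foldl_cons, hsplit, hb, Bool.false_eq_true, if_false, hS, List.modifyHead]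
      by_cases hm : String.ofList [c] ∈ charvalues
      · rw [if_neg (not_not_intro hm), ih]
        simp only [hS, List.map_cons, List.flatMap_cons, List.filter_cons, hm, decide_true,
          Bool.not_true, if_true, Bool.false_eq_true, if_false, Prod.mk.injEq]
        constructor
        · rw [pv_join_cons_head, String.append_assoc, ← String.ofList_append]
          simp
        · simp
      · rw [if_pos hm, if_neg hn, ih]
        simp only [hS, List.map_cons, List.flatMap_cons, List.filter_cons, hm, decide_false,
          Bool.not_false, if_true, Bool.false_eq_true, if_false, Prod.mk.injEq]
        constructor
        · show acc.1 ++ "" ++ _ = _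
          simp
        · simp

-- ===== VERDICT (by name: the statement is the Claim_ definition above) =====
theorem refined_spec : Claim_equal_refined := by
  intro charvalues oldinput _
  unfold Spec_refined refined refined_alt
  simp only [PySem.Set.mem_ofList]
  rw [pv_main, pv_outer]
  simp
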